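-- pv_equiv track=rewrite | github.com/CactusHertz/4-In-A-Line | alphaBeta.py | check_terminal
-- ===== SOURCE A (Python) =====
-- def check_terminal(board):
--     # horizontal check
--     for r in board:
--         for c in range(len(r) - 3):
--             if r[c] == r[c + 1] == r[c + 2] == r[c + 3] and r[c] != '-':
--                 return True
--     # vertical check
--     for c in range(len(board[0])):
--         for r in range(len(board) - 3):
--             if board[r][c] == board[r + 1][c] == board[r + 2][c] == board[r + 3][c] and board[r][c] != '-':
--                 return True
--
--     # board full check
--     spots_left = False
--     for r in range(len(board)):
--         for c in range(len(board[0])):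
--             if board[r][c] == '-':
--                 spots_left = True
--     if spots_left == False:
--         return True
--
--     return False
-- ===== SOURCE B (Python) =====
-- def check_terminal(board):
--     # one unified pass over the H x len(board[0]) grid: rows and columns as lines,
--     # run-length counting instead of fixed 4-cell windows
--     width = len(board[0])
--     lines = list(board) + [[row[c] for row in board] for c in range(width)]
--     for line in lines:
--         run, prev = 0, None
--         for cell in line:
--             if cell == '-':
--                 run = 0
--             elif cell == prev:
--                 run += 1
--             else:
--                 run = 1
--             prev = cell
--             if run >= 4:
--                 return True
--     return all(row[c] != '-' for row in board for c in range(width))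
-- ===== Notes on version B (the rewrite author's own statement) =====
-- stated objective: alternative
-- what changed: Replaces the two separate fixed-four-cell-window scans (horizontal over rows, vertical over index pairs) by one unified traversal of all lines (rows plus extracted columns) with a run-length counter that resets on '-' or a cell change, and does the fullness test as a direct all() scan of the H x len(board[0]) grid.
-- outside the precondition, e.g. on check_terminal([['x', 'x', 'x', 'x'], ['y']]): A returns True, B raises IndexError
import Mathlib
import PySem

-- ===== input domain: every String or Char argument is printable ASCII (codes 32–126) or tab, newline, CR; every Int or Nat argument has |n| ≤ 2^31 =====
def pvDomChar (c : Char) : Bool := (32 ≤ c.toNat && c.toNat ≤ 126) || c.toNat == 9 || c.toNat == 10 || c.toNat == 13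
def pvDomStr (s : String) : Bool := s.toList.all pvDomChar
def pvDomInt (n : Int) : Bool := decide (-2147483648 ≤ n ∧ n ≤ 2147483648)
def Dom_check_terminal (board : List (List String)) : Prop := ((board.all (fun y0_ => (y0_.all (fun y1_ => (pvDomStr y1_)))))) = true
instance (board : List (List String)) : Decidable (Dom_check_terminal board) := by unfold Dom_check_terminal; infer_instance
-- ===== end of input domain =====

-- B unifies the horizontal/vertical window scans of A into one run-length pass over rows plus
-- columns (objective: alternative decomposition, same asymptotic cost). Return value only; no mutation.

-- ===== PORT A =====
-- Every index below is in range on Pre_ (c ≤ len r - 4, r ≤ H - 4, c < len board[0] ≤ row lengths),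
-- so Python's r[c]/board[r][c] is ported as getD with an unused default; board[0] is board.getD 0 [].
def pvWndA (r : List String) (c : Nat) : Bool :=
  (r.getD c "" == r.getD (c+1) "") && (r.getD (c+1) "" == r.getD (c+2) "") &&
  (r.getD (c+2) "" == r.getD (c+3) "") && (r.getD c "" != "-")

def check_terminal (board : List (List String)) : Bool :=
  -- horizontal check (double loop with `return True` ≡ any)
  if board.any (fun r => (List.range (r.length - 3)).any (fun c => pvWndA r c)) then true
  -- vertical check
  else if (List.range (board.getD 0 []).length).any (fun c =>
      (List.range (board.length - 3)).any (fun r =>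
        ((board.getD r []).getD c "" == (board.getD (r+1) []).getD c "") &&
        ((board.getD (r+1) []).getD c "" == (board.getD (r+2) []).getD c "") &&
        ((board.getD (r+2) []).getD c "" == (board.getD (r+3) []).getD c "") &&
        ((board.getD r []).getD c "" != "-"))) then true
  else
    -- board full check (full double loop setting spots_left, no early exit)
    let spots_left := (List.range board.length).any (fun r =>
      (List.range (board.getD 0 []).length).any (fun c => (board.getD r []).getD c "" == "-"))
    if spots_left == false then true else false

-- ===== PORT B =====
-- inner loop of Source B: run-length counter with early return at run ≥ 4
def hasRun4Go : Nat → Option String → List String → Bool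
  | _, _, [] => false
  | run, prev, cell :: rest =>
    let run' := if cell == "-" then 0 else if some cell == prev then run + 1 else 1
    if 4 ≤ run' then true else hasRun4Go run' (some cell) rest

def hasRun4 (line : List String) : Bool := hasRun4Go 0 none line

def check_terminal_alt (board : List (List String)) : Bool :=
  let width := (board.getD 0 []).length   -- len(board[0]); Python raises on [] outside Pre_
  let lines := board ++ (List.range width).map
      (fun c => board.map (fun row => row.getD c ""))   -- row[c], in range on Pre_
  if lines.any hasRun4 then true
  else board.all (fun row => (List.range width).all (fun c => row.getD c "" != "-"))

-- ===== PRECONDITION & SPEC =====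
-- Pre_ excludes empty boards, on which A raises IndexError at board[0], and boards with a row
-- shorter than board[0], on which A's vertical/full scans raise IndexError (unless a horizontal win
-- returns first, where B's column extraction itself raises IndexError).
def Pre_check_terminal (board : List (List String)) : Prop :=
  board ≠ [] ∧ ∀ r ∈ board, (board.getD 0 []).length ≤ r.length
instance (board : List (List String)) : Decidable (Pre_check_terminal board) := by
  unfold Pre_check_terminal; infer_instance
def pvWitness_check_terminal : List (List String) := [["-", "x"], ["o", "-"]]
def Spec_check_terminal (board : List (List String)) (out : Bool) : Prop := out = check_terminal_alt board
instance (board : List (List String)) (out : Bool) : Decidable (Spec_check_terminal board out) := by unfold Spec_check_terminal; infer_instance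

-- ===== CLAIM (what is proved, stated in full; the proofs are below) =====
def Claim_equal_check_terminal : Prop := ∀ (board : List (List String)), Dom_check_terminal board → Pre_check_terminal board → Spec_check_terminal board (check_terminal board)

-- ===== LEMMAS AND PROOFS =====

lemma anyCongrMem {α : Type} (l : List α) (f g : α → Bool)
    (h : ∀ a ∈ l, f a = g a) : l.any f = l.any g := by
  induction l with
  | nil => rfl
  | cons a t ih =>
    simp only [List.any_cons, h a (by simp), ih (fun b hb => h b (by simp [hb]))]

-- proof-side normal form for "this line contains four equal adjacent non-'-' cells"
def win4 : List String → Bool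
  | [] => false
  | x :: l => (decide (4 ≤ (x :: l).length) && pvWndA (x :: l) 0) || win4 l

lemma win4_short (l : List String) (h : l.length ≤ 3) : win4 l = false := by
  induction l with
  | nil => rfl
  | cons x t ih =>
    simp only [List.length_cons] at h
    rw [win4]
    have h4 : decide (4 ≤ (x :: t).length) = false := by
      simp [List.length_cons]; omega
    rw [h4, ih (by omega)]
    simp

lemma pvWndA_cons_succ (x : String) (t : List String) (c : Nat) :
    pvWndA (x :: t) (c+1) = pvWndA t c := by
  simp [pvWndA]

-- A's index-window scan over a line equals win4
lemma rangeAny_eq_win4 (l : List String) :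
    (List.range (l.length - 3)).any (fun c => pvWndA l c) = win4 l := by
  induction l with
  | nil => rfl
  | cons x t ih =>
    by_cases h : 3 ≤ t.length
    · have hlen : (x :: t).length - 3 = (t.length - 3) + 1 := by
        simp [List.length_cons]; omega
      rw [hlen, List.range_succ_eq_map]
      simp only [List.any_cons, List.any_map]
      have h4 : decide (4 ≤ (x :: t).length) = true := by
        simp [List.length_cons]; omega
      rw [win4, h4]
      have : (List.range (t.length - 3)).any (fun c => pvWndA (x :: t) (c + 1))
           = (List.range (t.length - 3)).any (fun c => pvWndA t c) :=
        anyCongrMem _ _ _ (fun c _ => pvWndA_cons_succ x t c)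
      simp only [Function.comp_def, this, ih, Bool.true_and]
    · have hlen : (x :: t).length - 3 = 0 := by simp [List.length_cons]; omega
      rw [hlen]
      have := win4_short (x :: t) (by simp [List.length_cons]; omega)
      simp [this]

lemma win4_dash_cons (rest : List String) : win4 ("-" :: rest) = win4 rest := by
  simp [win4, pvWndA]

lemma win4_drop_prefix (k : Nat) (p cell : String) (rest : List String)
    (hk : k ≤ 3) (hpc : (p == cell) = false) :
    win4 (List.replicate k p ++ cell :: rest) = win4 (cell :: rest) := by
  interval_cases k <;> simp [win4, pvWndA, List.replicate, hpc]

-- invariant of B's run-length loop: the state (run, p) stands for a virtual prefix of run copies of p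
lemma hasRun4Go_eq (l : List String) : ∀ (run : Nat) (p : String), run ≤ 3 →
    (run = 0 ∨ (p == "-") = false) →
    hasRun4Go run (some p) l = win4 (List.replicate run p ++ l) := by
  induction l with
  | nil =>
    intro run p hr _
    have h0 : hasRun4Go run (some p) [] = false := rfl
    rw [h0, List.append_nil,
      win4_short (List.replicate run p) (by simp [List.length_replicate]; omega)]
  | cons cell rest ih =>
    intro run p hr hinv
    by_cases hd : (cell == "-") = true
    · have hcell : cell = "-" := eq_of_beq hd
      have step : hasRun4Go run (some p) (cell :: rest) = hasRun4Go 0 (some cell) rest := by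
        simp [hasRun4Go, hd]
      rw [step, ih 0 cell (by omega) (Or.inl rfl)]
      subst hcell
      rcases hinv with h0 | hp
      · simp [h0, win4_dash_cons]
      · rcases Nat.eq_zero_or_pos run with h0 | hpos
        · simp [h0, win4_dash_cons]
        · simp only [List.replicate_zero, List.nil_append]
          rw [win4_drop_prefix run p "-" rest hr hp, win4_dash_cons]
    · have hd' : (cell == "-") = false := by simpa using hd
      by_cases he : (cell == p) = true
      · have hcp : cell = p := eq_of_beq he
        by_cases h3 : run = 3
        · have step : hasRun4Go run (some p) (cell :: rest) = true := by
            simp [hasRun4Go, hd', he, h3]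
          rw [step]
          subst h3; subst hcp
          have : List.replicate 3 cell ++ cell :: rest = cell :: cell :: cell :: cell :: rest := by
            simp [List.replicate]
          rw [this]
          symm
          simp only [win4, pvWndA]
          simp only [List.length_cons, List.getD]
          simp
          exact Or.inl (by simpa using hd')
        · have hr' : run + 1 ≤ 3 := by omega
          have step : hasRun4Go run (some p) (cell :: rest) = hasRun4Go (run + 1) (some cell) rest := by
            have : ¬ (4 ≤ run + 1) := by omega
            simp [hasRun4Go, hd', he, this]
          rw [step, ih (run + 1) cell hr' (Or.inr hd')]
          subst hcp
          congr 1
          rw [List.replicate_succ', List.append_assoc, List.singleton_append]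
      · have he' : (cell == p) = false := by simpa using he
        have step : hasRun4Go run (some p) (cell :: rest) = hasRun4Go 1 (some cell) rest := by
          simp [hasRun4Go, hd', he']
        rw [step, ih 1 cell (by omega) (Or.inr hd')]
        have hpc : (p == cell) = false := by
          have : cell ≠ p := by simpa using he'
          simpa using (beq_eq_false_iff_ne).2 (Ne.symm this)
        rcases Nat.eq_zero_or_pos run with h0 | hpos
        · simp [h0, List.replicate]
        · rw [win4_drop_prefix run p cell rest hr hpc]
          simp [List.replicate]

lemma hasRun4_eq_win4 (l : List String) : hasRun4 l = win4 l := by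
  cases l with
  | nil => rfl
  | cons cell rest =>
    by_cases hd : (cell == "-") = true
    · have hcell : cell = "-" := eq_of_beq hd
      have step : hasRun4 (cell :: rest) = hasRun4Go 0 (some cell) rest := by
        simp [hasRun4, hasRun4Go, hd]
      rw [step, hasRun4Go_eq rest 0 cell (by omega) (Or.inl rfl)]
      subst hcell
      simp [win4_dash_cons, List.replicate]
    · have hd' : (cell == "-") = false := by simpa using hd
      have step : hasRun4 (cell :: rest) = hasRun4Go 1 (some cell) rest := by
        simp [hasRun4, hasRun4Go, hd']
      rw [step, hasRun4Go_eq rest 1 cell (by omega) (Or.inr hd')]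
      simp [List.replicate]

lemma rowScan_eq_hasRun4 (l : List String) :
    (List.range (l.length - 3)).any (fun c => pvWndA l c) = hasRun4 l := by
  rw [rangeAny_eq_win4, hasRun4_eq_win4]

lemma getD_map_getD (l : List (List String)) (c : Nat) : ∀ (r : Nat),
    (l.map (fun row => row.getD c "")).getD r "" = (l.getD r []).getD c "" := by
  induction l with
  | nil => intro r; simp
  | cons h t ih =>
    intro r
    cases r with
    | zero => simp
    | succ n => simpa using ih n

lemma rangeAnyGet {α : Type} (l : List α) (d : α) (f : α → Bool) :
    (List.range l.length).any (fun i => f (l.getD i d)) = l.any f := by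
  induction l with
  | nil => rfl
  | cons a t ih =>
    rw [List.length_cons, List.range_succ_eq_map]
    simp only [List.any_cons, List.any_map, Function.comp_def, List.getD_cons_succ,
      List.getD_cons_zero, ih]

-- ===== VERDICT (by name: the statement is the Claim_ definition above) =====
theorem check_terminal_spec : Claim_equal_check_terminal := by
  intro board _ _
  unfold Spec_check_terminal check_terminal check_terminal_alt
  -- name the three logical components
  set W := (board.getD 0 []).length with hW
  -- horizontal component
  have hH : board.any (fun r => (List.range (r.length - 3)).any (fun c => pvWndA r c))
          = board.any hasRun4 :=
    anyCongrMem _ _ _ (fun r _ => rowScan_eq_hasRun4 r)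
  -- vertical component
  have hV : (List.range W).any (fun c =>
      (List.range (board.length - 3)).any (fun r =>
        ((board.getD r []).getD c "" == (board.getD (r+1) []).getD c "") &&
        ((board.getD (r+1) []).getD c "" == (board.getD (r+2) []).getD c "") &&
        ((board.getD (r+2) []).getD c "" == (board.getD (r+3) []).getD c "") &&
        ((board.getD r []).getD c "" != "-")))
      = ((List.range W).map (fun c => board.map (fun row => row.getD c ""))).any hasRun4 := by
    rw [List.any_map]
    apply anyCongrMem
    intro c _
    have hcol : ∀ r : Nat,
        (board.map (fun row => row.getD c "")).getD r "" = (board.getD r []).getD c "" :=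
      getD_map_getD board c
    have hlen : (board.map (fun row => row.getD c "")).length = board.length := by simp
    rw [show (Function.comp hasRun4 (fun c => board.map (fun row => row.getD c ""))) c
          = hasRun4 (board.map (fun row => row.getD c "")) from rfl,
        ← rowScan_eq_hasRun4, hlen]
    apply anyCongrMem
    intro r _
    simp only [pvWndA, hcol]
  -- fullness component
  have hF : (List.range board.length).any (fun r =>
        (List.range W).any (fun c => (board.getD r []).getD c "" == "-"))
      = board.any (fun row => (List.range W).any (fun c => row.getD c "" == "-")) := by
    exact rangeAnyGet board [] (fun row => (List.range W).any (fun c => row.getD c "" == "-"))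
  have hFull : board.all (fun row => (List.range W).all (fun c => row.getD c "" != "-"))
      = ! board.any (fun row => (List.range W).any (fun c => row.getD c "" == "-")) := by
    simp [List.all_eq_not_any_not, bne, Bool.not_not]
  dsimp only
  rw [List.any_append, hH, hV, hF, hFull]
  cases board.any hasRun4 <;>
    cases ((List.range W).map (fun c => board.map (fun row => row.getD c ""))).any hasRun4 <;>
    cases board.any (fun row => (List.range W).any (fun c => row.getD c "" == "-")) <;> simp
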